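-- pv_equiv track=rewrite | github.com/chenyongzhe/sexeducation | save2Txt.py | vo
-- ===== SOURCE A (Python) =====
-- def vo(mp):
--     if not 'voter' in mp:
--         return 0
--     s = mp['voter']
--     if s == None:
--         return 0
--     s = s.replace('\n', ' ')
--     for e in s.split(' ')[::-1]:
--         e = e.replace(',', '')
--         if (e.isdigit()):
--             return int(e)
--     return 0
-- ===== SOURCE B (Python) =====
-- def vo(mp):
--     if 'voter' not in mp:
--         return 0
--     s = mp['voter']
--     if s is None:
--         return 0
--     result = 0
--     for e in s.replace('\n', ' ').split(' '):
--         e = e.replace(',', '')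
--         if e.isdigit():
--             result = int(e)
--     return result
-- ===== Notes on version B (the rewrite author's own statement) =====
-- stated objective: simpler
-- what changed: A reverses the token list and early-returns at the first digit token; B scans the tokens forward once with a result accumulator that the last digit token overwrites, with no reversal and no early return.
import Mathlib
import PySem

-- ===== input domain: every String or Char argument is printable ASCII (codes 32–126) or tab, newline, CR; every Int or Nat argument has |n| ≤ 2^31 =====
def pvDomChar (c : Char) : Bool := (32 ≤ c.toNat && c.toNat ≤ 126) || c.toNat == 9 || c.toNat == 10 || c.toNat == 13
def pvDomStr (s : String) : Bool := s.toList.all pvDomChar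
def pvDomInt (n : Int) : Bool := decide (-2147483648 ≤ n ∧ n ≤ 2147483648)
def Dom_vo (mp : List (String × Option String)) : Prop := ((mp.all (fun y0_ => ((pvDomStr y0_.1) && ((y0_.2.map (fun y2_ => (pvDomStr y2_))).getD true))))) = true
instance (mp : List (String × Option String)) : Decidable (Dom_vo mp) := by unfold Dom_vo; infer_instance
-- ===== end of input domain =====

-- B replaces A's reverse-and-early-return scan by a single forward pass with a
-- result accumulator (simpler decomposition, same return value).

-- ===== PORT A =====
-- the for-loop with early return: first comma-stripped digit token wins, else fall through
def voScanA : List String → Int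
  | [] => 0
  | e :: rest =>
      let e2 := PySem.Str.replace e "," ""
      if PySem.Str.strIsdigit e2 then (PySem.Int.ofStr? e2).getD 0 else voScanA rest

def vo (mp : List (String × Option String)) : Int :=
  let d := PySem.Dict.ofList mp
  if !(d.contains "voter") then 0
  else
    match d.getD "voter" none with
    | none => 0
    | some s =>
        let s2 := PySem.Str.replace s "\n" " "
        voScanA ((PySem.List.slice? ((PySem.Str.split? s2 " ").getD []) none none (-1)).getD [])

-- ===== PORT B =====
def vo_alt (mp : List (String × Option String)) : Int :=
  let d := PySem.Dict.ofList mp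
  if !(d.contains "voter") then 0
  else
    match d.getD "voter" none with
    | none => 0
    | some s =>
        ((PySem.Str.split? (PySem.Str.replace s "\n" " ") " ").getD []).foldl
          (fun result e =>
            let e2 := PySem.Str.replace e "," ""
            if PySem.Str.strIsdigit e2 then (PySem.Int.ofStr? e2).getD 0 else result) 0

-- ===== PRECONDITION & SPEC =====
def Spec_vo (mp : List (String × Option String)) (out : Int) : Prop := out = vo_alt mp
instance (mp : List (String × Option String)) (out : Int) : Decidable (Spec_vo mp out) := by unfold Spec_vo; infer_instance

-- ===== CLAIM (what is proved, stated in full; the proofs are below) =====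
def Claim_equal_vo : Prop := ∀ (mp : List (String × Option String)), Dom_vo mp → Spec_vo mp (vo mp)

-- ===== LEMMAS AND PROOFS =====
lemma voScan_reverse (l : List String) :
    voScanA l.reverse =
      l.foldl (fun result e =>
        let e2 := PySem.Str.replace e "," ""
        if PySem.Str.strIsdigit e2 then (PySem.Int.ofStr? e2).getD 0 else result) 0 := by
  suffices h : ∀ r : List String,
      voScanA r =
        r.reverse.foldl (fun result e =>
          let e2 := PySem.Str.replace e "," ""
          if PySem.Str.strIsdigit e2 then (PySem.Int.ofStr? e2).getD 0 else result) 0 by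
    simpa using h l.reverse
  intro r
  induction r with
  | nil => rfl
  | cons e rest ih =>
      simp only [voScanA, List.reverse_cons, List.foldl_append, List.foldl_cons, List.foldl_nil, ih]

-- ===== VERDICT (by name: the statement is the Claim_ definition above) =====
theorem vo_spec : Claim_equal_vo := by
  intro mp _
  unfold Spec_vo vo vo_alt
  cases h : (PySem.Dict.ofList mp).contains "voter" with
  | false => simp [h]
  | true =>
      simp only [h]
      cases (PySem.Dict.ofList mp).getD "voter" none with
      | none => rfl
      | some s =>
          simpa [PySem.List.slice?_none_none_neg_one] using
            voScan_reverse ((PySem.Str.split? (PySem.Str.replace s "\n" " ") " ").getD [])
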